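-- pv_equiv track=rewrite | github.com/raydemo1/EmailVul | backend/features/rules.py | attachment_score
-- ===== SOURCE A (Python) =====
-- DANGEROUS_EXTS = ["exe","js","vbs","ps1","bat","cmd","scr","jar","hta","pkg"]
--
-- def attachment_score(attachments):
--     if not attachments:
--         return 0
--     score = 0
--     for name in attachments:
--         ext = name.rsplit(".", 1)[-1].lower() if "." in name else ""
--         if ext in DANGEROUS_EXTS:
--             score += 40
--         elif ext in ["doc","docm","xls","xlsm","pptm"]:
--             score += 25
--         elif ext in ["zip","rar","7z"]:
--             score += 15
--         else:
--             score += 5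
--     return min(100, score)
-- ===== SOURCE B (Python) =====
-- DANGEROUS_EXTS = ["exe","js","vbs","ps1","bat","cmd","scr","jar","hta","pkg"]
--
-- def attachment_score(attachments):
--     # Count attachments per risk tier (tier lists are pairwise disjoint),
--     # then compute the total arithmetically instead of scoring item by item.
--     exts = [n.rsplit(".", 1)[-1].lower() if "." in n else "" for n in attachments]
--     d = sum(1 for e in exts if e in DANGEROUS_EXTS)
--     o = sum(1 for e in exts if e in ("doc", "docm", "xls", "xlsm", "pptm"))
--     a = sum(1 for e in exts if e in ("zip", "rar", "7z"))
--     return min(100, 40 * d + 25 * o + 15 * a + 5 * (len(exts) - d - o - a))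
-- ===== Notes on version B (the rewrite author's own statement) =====
-- stated objective: alternative
-- what changed: Replaces the per-attachment if/elif scoring loop by tier counting: extract all extensions once, count how many fall in each of the three (pairwise disjoint) tier lists, and compute the total as 40*d + 25*o + 15*a + 5*rest capped at 100 - no per-item branch cascade or accumulator loop remains.
import Mathlib
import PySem

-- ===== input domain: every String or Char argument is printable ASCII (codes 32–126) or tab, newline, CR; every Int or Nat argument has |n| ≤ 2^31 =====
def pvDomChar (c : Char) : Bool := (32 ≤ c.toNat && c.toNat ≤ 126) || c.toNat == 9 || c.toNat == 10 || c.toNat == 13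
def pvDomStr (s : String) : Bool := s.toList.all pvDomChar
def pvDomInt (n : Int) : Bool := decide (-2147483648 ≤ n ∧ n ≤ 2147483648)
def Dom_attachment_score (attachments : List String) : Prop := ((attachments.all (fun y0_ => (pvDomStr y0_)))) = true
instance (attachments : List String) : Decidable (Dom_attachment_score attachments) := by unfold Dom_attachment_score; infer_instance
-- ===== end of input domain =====

-- B replaces A's per-item if/elif scoring loop by tier counting over the extracted extensions
-- plus one arithmetic formula 40*d + 25*o + 15*a + 5*rest (tiers are disjoint) — alternative, same cost.


-- ===== PORT A =====
-- hand port of `name.rsplit(".", 1)[-1].lower() if "." in name else ""`: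
-- rsplit(".",1)[-1] is the suffix after the LAST '.' (exact for a single-char separator
-- with maxsplit 1 indexed at [-1]); both Pythons use this very expression.
def pvExt (name : String) : String :=
  if PySem.Str.isIn "." name then
    String.ofList (PySem.Chars.lower ((name.toList.reverse.takeWhile (fun c => c != '.')).reverse))
  else ""

def DANGEROUS_EXTS : List String := ["exe","js","vbs","ps1","bat","cmd","scr","jar","hta","pkg"]

def attachment_score (attachments : List String) : Int :=
  if attachments = [] then 0
  else
    let score := attachments.foldl (fun score name =>
      let ext := pvExt name
      if ext ∈ DANGEROUS_EXTS then score + 40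
      else if ext ∈ (["doc","docm","xls","xlsm","pptm"] : List String) then score + 25
      else if ext ∈ (["zip","rar","7z"] : List String) then score + 15
      else score + 5) 0
    min 100 score

-- ===== PORT B =====
def attachment_score_alt (attachments : List String) : Int :=
  let exts := attachments.map pvExt
  let d := exts.countP (fun e => decide (e ∈ DANGEROUS_EXTS))
  let o := exts.countP (fun e => decide (e ∈ (["doc","docm","xls","xlsm","pptm"] : List String)))
  let a := exts.countP (fun e => decide (e ∈ (["zip","rar","7z"] : List String)))
  min 100 (40 * (d : Int) + 25 * (o : Int) + 15 * (a : Int) + 5 * ((exts.length : Int) - d - o - a))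

-- ===== PRECONDITION & SPEC =====
def Spec_attachment_score (attachments : List String) (out : Int) : Prop := out = attachment_score_alt attachments
instance (attachments : List String) (out : Int) : Decidable (Spec_attachment_score attachments out) := by unfold Spec_attachment_score; infer_instance

-- ===== CLAIM (what is proved, stated in full; the proofs are below) =====
def Claim_equal_attachment_score : Prop := ∀ (attachments : List String), Dom_attachment_score attachments → Spec_attachment_score attachments (attachment_score attachments)

-- ===== LEMMAS AND PROOFS =====

-- the three tier lists are pairwise disjoint
theorem pvTier_disjoint (e : String) :
    (e ∈ DANGEROUS_EXTS → e ∉ (["doc","docm","xls","xlsm","pptm"] : List String) ∧ e ∉ (["zip","rar","7z"] : List String)) ∧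
    (e ∈ (["doc","docm","xls","xlsm","pptm"] : List String) → e ∉ (["zip","rar","7z"] : List String)) := by
  constructor
  · intro h
    simp only [DANGEROUS_EXTS, List.mem_cons, List.not_mem_nil, or_false] at h
    rcases h with rfl|rfl|rfl|rfl|rfl|rfl|rfl|rfl|rfl|rfl <;> exact ⟨by decide, by decide⟩
  · intro h
    simp only [List.mem_cons, List.not_mem_nil, or_false] at h
    rcases h with rfl|rfl|rfl|rfl|rfl <;> decide

-- the fold equals the tier-count arithmetic, for every accumulator
theorem pvFold_counts (l : List String) (acc : Int) :
    l.foldl (fun score name =>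
      let ext := pvExt name
      if ext ∈ DANGEROUS_EXTS then score + 40
      else if ext ∈ (["doc","docm","xls","xlsm","pptm"] : List String) then score + 25
      else if ext ∈ (["zip","rar","7z"] : List String) then score + 15
      else score + 5) acc
    = acc + 40 * ((l.map pvExt).countP (fun e => decide (e ∈ DANGEROUS_EXTS)) : Int)
        + 25 * ((l.map pvExt).countP (fun e => decide (e ∈ (["doc","docm","xls","xlsm","pptm"] : List String))) : Int)
        + 15 * ((l.map pvExt).countP (fun e => decide (e ∈ (["zip","rar","7z"] : List String))) : Int)
        + 5 * (((l.map pvExt).length : Int)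
              - (l.map pvExt).countP (fun e => decide (e ∈ DANGEROUS_EXTS))
              - (l.map pvExt).countP (fun e => decide (e ∈ (["doc","docm","xls","xlsm","pptm"] : List String)))
              - (l.map pvExt).countP (fun e => decide (e ∈ (["zip","rar","7z"] : List String)))) := by
  induction l generalizing acc with
  | nil => simp
  | cons x xs ih =>
    simp only [List.foldl_cons, List.map_cons, List.countP_cons, List.length_cons]
    rw [ih]
    obtain ⟨hd, ho⟩ := pvTier_disjoint (pvExt x)
    by_cases h1 : pvExt x ∈ DANGEROUS_EXTS
    · obtain ⟨h2, h3⟩ := hd h1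
      simp only [h1, h2, h3, if_true, if_false, decide_true, decide_false]
      push_cast; ring
    · by_cases h2 : pvExt x ∈ (["doc","docm","xls","xlsm","pptm"] : List String)
      · have h3 := ho h2
        simp only [h1, h2, h3, if_true, if_false, decide_true, decide_false]
        push_cast; ring
      · by_cases h3 : pvExt x ∈ (["zip","rar","7z"] : List String)
        · simp only [h1, h2, h3, if_true, if_false, decide_true, decide_false]
          push_cast; ring
        · simp only [h1, h2, h3, if_false, decide_false]
          push_cast; ring

-- ===== VERDICT (by name: the statement is the Claim_ definition above) =====
theorem attachment_score_spec : Claim_equal_attachment_score := by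
  intro attachments _
  unfold Spec_attachment_score attachment_score attachment_score_alt
  by_cases h : attachments = []
  · subst h; simp
  · simp only [h, if_false]
    rw [pvFold_counts]
    ring_nf
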